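-- pv_equiv track=rewrite | github.com/atoye1/ThisIsCodingTest | Greedy/quiz/01.traveler_guild.py | book_solution
-- ===== SOURCE A (Python) =====
-- def book_solution(n, mans):
--     mans.sort()
--     result = 0
--     count = 0
--
--     for i in mans:
--         count += 1
--         if count >= i:
--             result += 1
--             count = 0
--     return result
-- ===== SOURCE B (Python) =====
-- def book_solution(n, mans):
--     # Count multiplicities once, then process each distinct fear value as a
--     # whole block with arithmetic instead of per-adventurer steps.
--     # (Unlike A, this does not sort `mans` in place; return value is identical.)
--     cnt = {}
--     for v in mans:
--         cnt[v] = cnt.get(v, 0) + 1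
--     result = 0
--     carry = 0
--     for v in sorted(cnt):
--         m = cnt[v]
--         if v <= 0:
--             result += m
--             carry = 0
--         else:
--             t = carry + m
--             result += t // v
--             carry = t % v
--     return result
-- ===== Notes on version B (the rewrite author's own statement) =====
-- stated objective: alternative
-- what changed: B replaces A's sort of all n elements plus per-element greedy pass by a multiplicity counter and a sort of only the distinct fear values, processing each value's whole block in one step with division/modulus arithmetic (a win only on duplicate-heavy inputs, so no speed is claimed).
import Mathlib
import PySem

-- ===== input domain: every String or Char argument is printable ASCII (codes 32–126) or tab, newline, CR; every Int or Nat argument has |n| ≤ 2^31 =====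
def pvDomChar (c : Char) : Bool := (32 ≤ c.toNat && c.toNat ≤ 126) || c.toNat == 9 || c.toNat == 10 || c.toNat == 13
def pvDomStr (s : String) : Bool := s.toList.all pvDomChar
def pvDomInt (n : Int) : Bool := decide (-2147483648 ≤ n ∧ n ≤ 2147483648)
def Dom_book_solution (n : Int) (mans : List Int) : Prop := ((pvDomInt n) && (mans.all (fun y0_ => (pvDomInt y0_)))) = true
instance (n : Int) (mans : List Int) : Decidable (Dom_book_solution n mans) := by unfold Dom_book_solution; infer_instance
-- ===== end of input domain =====

-- B counts multiplicities and sorts only the distinct fear values, handling each value's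
-- block in O(1) by division/modulus; A sorts `mans` IN PLACE (a side effect B does not have) —
-- the equivalence proved here is about the return value.


-- ===== PORT A =====
-- A's loop body: count += 1; if count >= i: result += 1; count = 0
def bookStepA (st : Int × Int) (i : Int) : Int × Int :=
  let count := st.2 + 1
  if count ≥ i then (st.1 + 1, 0) else (st.1, count)

def book_solution (n : Int) (mans : List Int) : Int :=
  ((PySem.List.sorted mans (fun x => x) false).foldl bookStepA (0, 0)).1

-- ===== PORT B =====
-- B's loop body: one distinct value v with multiplicity m, carried count `carry`
def bookStepB (cnt : PySem.Dict Int Int) (st : Int × Int) (v : Int) : Int × Int :=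
  let m := cnt.getD v 0
  if v ≤ 0 then (st.1 + m, 0)
  else
    let t := st.2 + m
    (st.1 + PySem.Int.floordiv t v, PySem.Int.mod t v)

def book_solution_alt (n : Int) (mans : List Int) : Int :=
  let cnt := mans.foldl (fun d v => d.insert v (d.getD v 0 + 1)) PySem.Dict.empty
  ((PySem.List.sorted cnt.keys (fun x => x) false).foldl (bookStepB cnt) (0, 0)).1

-- ===== PRECONDITION & SPEC =====
def Spec_book_solution (n : Int) (mans : List Int) (out : Int) : Prop := out = book_solution_alt n mans
instance (n : Int) (mans : List Int) (out : Int) : Decidable (Spec_book_solution n mans out) := by unfold Spec_book_solution; infer_instance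

-- ===== CLAIM (what is proved, stated in full; the proofs are below) =====
def Claim_equal_book_solution : Prop := ∀ (n : Int) (mans : List Int), Dom_book_solution n mans → Spec_book_solution n mans (book_solution n mans)

-- ===== LEMMAS AND PROOFS =====

-- a block of m copies of a nonpositive value: every element forms a group, carry resets
lemma blockA_nonpos (v : Int) (hv : v ≤ 0) (m : Nat) (r c : Int) (hc : 0 ≤ c) (hm : 0 < m) :
    (List.replicate m v).foldl bookStepA (r, c) = (r + m, 0) := by
  have aux : ∀ (k : Nat) (r' : Int), (List.replicate k v).foldl bookStepA (r', 0) = (r' + k, 0) := by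
    intro k
    induction k with
    | zero => intro r'; simp
    | succ k ih =>
      intro r'
      have h1 : bookStepA (r', 0) v = (r' + 1, 0) := by
        simp only [bookStepA]; rw [if_pos (by omega)]
      rw [List.replicate_succ, List.foldl_cons, h1, ih]
      rw [Prod.mk.injEq]; exact ⟨by push_cast; ring, rfl⟩
  obtain ⟨k, rfl⟩ : ∃ k, m = k + 1 := ⟨m - 1, by omega⟩
  have h1 : bookStepA (r, c) v = (r + 1, 0) := by
    simp only [bookStepA]; rw [if_pos (by omega)]
  rw [List.replicate_succ, List.foldl_cons, h1, aux]
  rw [Prod.mk.injEq]; exact ⟨by push_cast; ring, rfl⟩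

-- a block of m copies of a positive value v starting from carry c < v
lemma blockA_pos (v : Int) (hv : 0 < v) (m : Nat) :
    ∀ (r c : Int), 0 ≤ c → c < v →
    (List.replicate m v).foldl bookStepA (r, c) = (r + (c + m) / v, (c + m) % v) := by
  induction m with
  | zero =>
    intro r c hc hcv
    simp [Int.ediv_eq_zero_of_lt hc hcv, Int.emod_eq_of_lt hc hcv]
  | succ m ih =>
    intro r c hc hcv
    rw [List.replicate_succ, List.foldl_cons]
    by_cases h : c + 1 ≥ v
    · have hstep : bookStepA (r, c) v = (r + 1, 0) := by
        simp only [bookStepA]; rw [if_pos h]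
      have hcv1 : c + 1 = v := by omega
      rw [hstep, ih (r + 1) 0 le_rfl hv]
      rw [Prod.mk.injEq]
      constructor
      · push_cast
        rw [(by omega : c + ((m : Int) + 1) = (m : Int) + 1 * v),
          Int.add_mul_ediv_right _ _ (by omega : v ≠ 0)]
        simp only [zero_add]
        ring
      · push_cast
        rw [(by omega : c + ((m : Int) + 1) = v + (m : Int)), Int.add_emod_left]
        simp
    · have hstep : bookStepA (r, c) v = (r, c + 1) := by
        simp only [bookStepA]; rw [if_neg h]
      rw [hstep, ih r (c + 1) (by omega) (by omega)]
      rw [Prod.mk.injEq]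
      constructor <;> · push_cast; ring_nf

-- the per-value fold over distinct sorted keys equals the per-element fold over the blocks
lemma loop_eq (mans : List Int) (cnt : PySem.Dict Int Int)
    (hcnt : ∀ v, cnt.getD v 0 = (mans.count v : Int)) :
    ∀ (K : List Int) (r c : Int), 0 ≤ c →
    K.Pairwise (· < ·) →
    (∀ x ∈ K, x ≤ 0 ∨ c < x) →
    (∀ x ∈ K, 0 < mans.count x) →
    (K.flatMap (fun v => List.replicate (mans.count v) v)).foldl bookStepA (r, c)
      = K.foldl (bookStepB cnt) (r, c) := by
  intro K
  induction K with
  | nil => intro r c _ _ _ _; simp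
  | cons v K' ih =>
    intro r c hc hpw hinv hpos
    have hpw' := (List.pairwise_cons.mp hpw).2
    have hvlt := (List.pairwise_cons.mp hpw).1
    have hposv : 0 < mans.count v := hpos v (by simp)
    rw [List.flatMap_cons, List.foldl_append, List.foldl_cons]
    by_cases hv : v ≤ 0
    · rw [blockA_nonpos v hv _ r c hc hposv]
      have hstep : bookStepB cnt (r, c) v = (r + (mans.count v : Int), 0) := by
        simp only [bookStepB, hcnt v]; rw [if_pos hv]
      rw [hstep, ih (r + (mans.count v : Int)) 0 le_rfl hpw'
        (fun x _ => by omega) (fun x hx => hpos x (by simp [hx]))]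
    · replace hv : 0 < v := by omega
      have hcv : c < v := by
        rcases hinv v (by simp) with h | h
        · omega
        · exact h
      rw [blockA_pos v hv _ r c hc hcv]
      have hstep : bookStepB cnt (r, c) v
          = (r + (c + (mans.count v : Int)) / v, (c + (mans.count v : Int)) % v) := by
        simp only [bookStepB, hcnt v,
          PySem.Int.floordiv_eq_ediv_of_pos hv, PySem.Int.mod_eq_emod_of_pos hv]
        rw [if_neg (by omega)]
      rw [hstep, ih _ _ (Int.emod_nonneg _ (by omega)) hpw'
        (fun x hx => Or.inr (lt_of_lt_of_le (Int.emod_lt_of_pos _ hv) (le_of_lt (hvlt x hx))))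
        (fun x hx => hpos x (by simp [hx]))]

-- count of an element in the flatMap of replicate-blocks
lemma count_flatMap_replicate (mans : List Int) (K : List Int) (hK : K.Nodup) (a : Int) :
    (K.flatMap (fun v => List.replicate (mans.count v) v)).count a
      = if a ∈ K then mans.count a else 0 := by
  induction K with
  | nil => simp
  | cons v K' ih =>
    have hv : v ∉ K' := (List.nodup_cons.mp hK).1
    have ih' := ih (List.nodup_cons.mp hK).2
    rw [List.flatMap_cons, List.count_append, List.count_replicate, ih']
    by_cases hav : a = v
    · subst hav
      simp [hv]
    · simp [hav, Ne.symm hav]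

-- the sorted list is the concatenation of the blocks of its sorted distinct values
lemma sorted_eq_flatMap (mans : List Int) :
    PySem.List.sorted mans (fun x => x) false
      = (PySem.List.sorted (PySem.Set.ofList mans) (fun x => x) false).flatMap
          (fun v => List.replicate (mans.count v) v) := by
  set K := PySem.List.sorted (PySem.Set.ofList mans) (fun x => x) false with hKdef
  have hKlt : K.Pairwise (· < ·) := PySem.List.sorted_ofList_pairwise_lt mans
  have hKnd : K.Nodup := hKlt.imp (fun h => ne_of_lt h)
  have hKmem : ∀ x, x ∈ K ↔ x ∈ mans := by
    intro x
    rw [hKdef, PySem.List.mem_sorted, PySem.Set.mem_ofList]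
  apply PySem.List.sorted_id_eq_of_perm_of_pairwise
  · refine List.perm_iff_count.mpr (fun a => ?_)
    rw [count_flatMap_replicate mans K hKnd a]
    by_cases ha : a ∈ K
    · simp [ha]
    · have : a ∉ mans := fun h => ha ((hKmem a).mpr h)
      simp [ha, (List.count_eq_zero.mpr this).symm]
  · rw [List.pairwise_flatMap]
    constructor
    · intro v _
      exact List.pairwise_replicate.mpr (Or.inr le_rfl)
    · refine hKlt.imp (fun {x y} h => ?_)
      intro p hp q hq
      rw [List.eq_of_mem_replicate hp, List.eq_of_mem_replicate hq]
      omega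

-- ===== VERDICT (by name: the statement is the Claim_ definition above) =====
theorem book_solution_spec : Claim_equal_book_solution := by
  intro n mans _
  unfold Spec_book_solution book_solution book_solution_alt
  rw [PySem.Dict.foldl_insert_getD_add_one_eq_counter]
  show (List.foldl bookStepA (0, 0) (PySem.List.sorted mans (fun x => x) false)).1
      = (List.foldl (bookStepB (PySem.Dict.counter mans)) (0, 0)
          (PySem.List.sorted (PySem.Dict.counter mans).keys (fun x => x) false)).1
  rw [PySem.Dict.keys_counter]
  set K := PySem.List.sorted (PySem.Set.ofList mans) (fun x => x) false with hKdef
  have hKlt : K.Pairwise (· < ·) := PySem.List.sorted_ofList_pairwise_lt mans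
  have hKmem : ∀ x, x ∈ K ↔ x ∈ mans := by
    intro x
    rw [hKdef, PySem.List.mem_sorted, PySem.Set.mem_ofList]
  rw [sorted_eq_flatMap mans, ← hKdef,
    loop_eq mans (PySem.Dict.counter mans) (fun v => PySem.Dict.getD_counter mans v) K 0 0
      le_rfl hKlt (fun x _ => by omega)
      (fun x hx => List.count_pos_iff.mpr ((hKmem x).mp hx))]
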